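-- pv_equiv track=rewrite | github.com/strawsyz/straw | EasyDeep/datasets/loan_dataset.py | handle_grade
-- ===== SOURCE A (Python) =====
-- def handle_grade(grade: str):
--     grade_level_ = grade[0]
--     grade_no_ = int(grade[1])
--     grade_levels = ["A", "B", "C", "D", "E", "F"]
--     for idx, grade_level in enumerate(grade_levels):
--         if grade_level_ == grade_level:
--             return idx * 10 + grade_no_
--     return None
-- ===== SOURCE B (Python) =====
-- def handle_grade(grade: str):
--     grade_no_ = int(grade[1])
--     idx = ord(grade[0]) - ord("A")
--     if 0 <= idx <= 5:
--         return idx * 10 + grade_no_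
--     return None
-- ===== Notes on version B (the rewrite author's own statement) =====
-- stated objective: idiomatic
-- what changed: Replaces the enumerate-scan over the fixed letter list with a closed-form index computed by ord arithmetic (ord(grade[0]) - ord('A'), range-checked 0..5).
import Mathlib
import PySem

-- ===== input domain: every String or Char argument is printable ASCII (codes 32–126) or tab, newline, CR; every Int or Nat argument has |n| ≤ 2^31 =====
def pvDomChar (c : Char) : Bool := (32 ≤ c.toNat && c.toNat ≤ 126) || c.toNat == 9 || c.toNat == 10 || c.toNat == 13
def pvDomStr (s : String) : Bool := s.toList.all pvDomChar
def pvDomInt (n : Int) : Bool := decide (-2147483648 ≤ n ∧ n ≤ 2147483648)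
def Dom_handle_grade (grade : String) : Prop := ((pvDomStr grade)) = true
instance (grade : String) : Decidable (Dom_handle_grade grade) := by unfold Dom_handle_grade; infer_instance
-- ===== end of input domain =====

-- B replaces A's scan over the fixed letter list with a closed-form ord-arithmetic index (idiomatic; same cost).

-- ===== PORT A =====
-- the for-loop over enumerate(grade_levels) with early return, as structural recursion
def handleGradeLoop (grade_level_ : Char) (grade_no_ : Int) : List (Int × Char) → Option Int
  | [] => none
  | (idx, grade_level) :: rest =>
      if grade_level_ = grade_level then some (idx * 10 + grade_no_)
      else handleGradeLoop grade_level_ grade_no_ rest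

def handle_grade (grade : String) : Option Int :=
  match PySem.Str.pyGet? grade 0 with
  | none => none  -- IndexError, excluded by Pre_
  | some grade_level_ =>
    match PySem.Str.pyGet? grade 1 with
    | none => none  -- IndexError, excluded by Pre_
    | some c1 =>
      match PySem.Int.ofChars? [c1] with
      | none => none  -- ValueError, excluded by Pre_
      | some grade_no_ =>
        let grade_levels : List Char := ['A', 'B', 'C', 'D', 'E', 'F']
        handleGradeLoop grade_level_ grade_no_ (PySem.List.enumerate grade_levels 0)

-- ===== PORT B =====
def handle_grade_alt (grade : String) : Option Int :=
  match PySem.Str.pyGet? grade 1 with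
  | none => none  -- IndexError, excluded by Pre_
  | some c1 =>
    match PySem.Int.ofChars? [c1] with
    | none => none  -- ValueError, excluded by Pre_
    | some grade_no_ =>
      match PySem.Str.pyGet? grade 0 with
      | none => none  -- unreachable when grade[1] exists
      | some c0 =>
        let idx : Int := (c0.toNat : Int) - ('A'.toNat : Int)
        if 0 ≤ idx ∧ idx ≤ 5 then some (idx * 10 + grade_no_) else none

-- ===== PRECONDITION & SPEC =====
-- Pre_ excludes exactly the inputs where A raises: strings shorter than 2 (IndexError)
-- and those whose second character is not a decimal digit (int() ValueError).
def Pre_handle_grade (grade : String) : Prop :=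
  2 ≤ grade.toList.length ∧ PySem.Chars.isdigit (grade.toList.getD 1 ' ') = true
instance (grade : String) : Decidable (Pre_handle_grade grade) := by unfold Pre_handle_grade; infer_instance
def pvWitness_handle_grade : String := "B3"

def Spec_handle_grade (grade : String) (out : Option Int) : Prop := out = handle_grade_alt grade
instance (grade : String) (out : Option Int) : Decidable (Spec_handle_grade grade out) := by unfold Spec_handle_grade; infer_instance

-- ===== CLAIM =====
def Claim_equal_handle_grade : Prop := ∀ (grade : String), Dom_handle_grade grade → Pre_handle_grade grade → Spec_handle_grade grade (handle_grade grade)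

-- ===== LEMMAS AND PROOFS =====
theorem pvCharToNatInj (a b : Char) (h : a.toNat = b.toNat) : a = b := by
  apply Char.ext; apply UInt32.toNat_inj.mp; exact h

theorem pvEnumLit : PySem.List.enumerate (['A','B','C','D','E','F'] : List Char) =
    [((0:Int),'A'),(1,'B'),(2,'C'),(3,'D'),(4,'E'),(5,'F')] := by decide

theorem pvLoopClosed (c0 : Char) (n : Int) :
    handleGradeLoop c0 n [((0:Int),'A'),(1,'B'),(2,'C'),(3,'D'),(4,'E'),(5,'F')] =
    (if 0 ≤ (c0.toNat : Int) - ('A'.toNat : Int) ∧ (c0.toNat : Int) - ('A'.toNat : Int) ≤ 5 then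
      some (((c0.toNat : Int) - ('A'.toNat : Int)) * 10 + n) else none) := by
  by_cases h : 65 ≤ c0.toNat ∧ c0.toNat ≤ 70
  · have hv : c0.toNat = 65 ∨ c0.toNat = 66 ∨ c0.toNat = 67 ∨ c0.toNat = 68 ∨
        c0.toNat = 69 ∨ c0.toNat = 70 := by omega
    rcases hv with h|h|h|h|h|h <;>
      (first
        | have e : c0 = 'A' := pvCharToNatInj _ _ (by rw [h]; rfl)
        | have e : c0 = 'B' := pvCharToNatInj _ _ (by rw [h]; rfl)
        | have e : c0 = 'C' := pvCharToNatInj _ _ (by rw [h]; rfl)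
        | have e : c0 = 'D' := pvCharToNatInj _ _ (by rw [h]; rfl)
        | have e : c0 = 'E' := pvCharToNatInj _ _ (by rw [h]; rfl)
        | have e : c0 = 'F' := pvCharToNatInj _ _ (by rw [h]; rfl)) <;>
      subst e <;> norm_num [handleGradeLoop] <;> split_ifs <;>
      first
        | exact absurd (congrArg Char.toNat (by assumption)) (by decide)
        | exact absurd (by assumption) (by decide)
        | norm_num [show 'A'.toNat = 65 from rfl, show 'B'.toNat = 66 from rfl,
            show 'C'.toNat = 67 from rfl, show 'D'.toNat = 68 from rfl,
            show 'E'.toNat = 69 from rfl, show 'F'.toNat = 70 from rfl]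
  · have hA : c0 ≠ 'A' := fun e => h (by subst e; decide)
    have hB : c0 ≠ 'B' := fun e => h (by subst e; decide)
    have hC : c0 ≠ 'C' := fun e => h (by subst e; decide)
    have hD : c0 ≠ 'D' := fun e => h (by subst e; decide)
    have hE : c0 ≠ 'E' := fun e => h (by subst e; decide)
    have hF : c0 ≠ 'F' := fun e => h (by subst e; decide)
    rw [if_neg (by simp only [not_and_or, show 'A'.toNat = 65 from rfl]; omega)]
    simp [handleGradeLoop, hA, hB, hC, hD, hE, hF]

-- ===== VERDICT =====
theorem handle_grade_spec : Claim_equal_handle_grade := by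
  intro grade _ hpre
  unfold Spec_handle_grade
  obtain ⟨hlen, -⟩ := hpre
  simp only [handle_grade, handle_grade_alt, PySem.Str.pyGet?]
  rcases hl : grade.toList with _ | ⟨c0, _ | ⟨c1, rest⟩⟩ <;> rw [hl] at hlen <;> simp at hlen
  have h0 : PySem.Chars.pyGet? (c0 :: c1 :: rest) 0 = some c0 := by
    have hp : (0:Int) ≤ (rest.length:Int) + 1 := by positivity
    simp [PySem.Chars.pyGet?, PySem.List.pyGet?, PySem.List.pyIdx?, hp]
  have h1 : PySem.Chars.pyGet? (c0 :: c1 :: rest) 1 = some c1 := by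
    simp [PySem.Chars.pyGet?, PySem.List.pyGet?, PySem.List.pyIdx?]
  rw [h0, h1]
  dsimp only
  cases PySem.Int.ofChars? [c1] with
  | none => rfl
  | some n =>
    dsimp only
    rw [pvEnumLit, pvLoopClosed]
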